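-- pv_equiv track=rewrite | github.com/myQLM/myqlm-fermion | qat/fermion/matchgates.py | _make_index_pair_list
-- ===== SOURCE A (Python) =====
-- from typing import List, Optional, Tuple
--
-- def _make_index_pair_list(M, slater: Optional[bool] = False):
--
--     if slater:
--         majorana_components = [(0, 1), (1, 0)]  # AB BA
--
--     else:
--         majorana_components = [(0, 1), (1, 0), (0, 0), (1, 1)]  # AB BA AA BB
--
--     index_pair_list = [(i, M + i) for i in range(M)]
--
--     for k in range(M // 2):
--
--         for j in range(M // 2):  # even
--
--             for A, B in majorana_components:
--                 index_pair_list.append((M * A + 2 * j, M * B + 2 * j + 1))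
--
--         for j in range(M // 2 - 1):  # odd
--
--             for A, B in majorana_components:
--                 index_pair_list.append((M * A + 2 * j + 1, M * B + 2 * j + 2))
--
--     return index_pair_list
-- ===== SOURCE B (Python) =====
-- def _make_index_pair_list(M, slater=False):
--     # Single flat pass: decode each output position n arithmetically instead of
--     # nested k/j/component loops.
--     mc = [(0, 1), (1, 0)] if slater else [(0, 1), (1, 0), (0, 0), (1, 1)]
--     L = len(mc)
--     h = M // 2
--     reps = max(h, 0)                 # number of identical k-blocks
--     width = max(2 * h - 1, 0)        # sub-positions per k-block (h even + h-1 odd)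
--     out = []
--     for n in range(M + reps * width * L):
--         if n < M:
--             out.append((n, M + n))
--         else:
--             m = (n - M) % (width * L)
--             t, c = divmod(m, L)
--             j, s = (t, 0) if t < h else (t - h, 1)
--             A, B = mc[c]
--             out.append((M * A + 2 * j + s, M * B + 2 * j + 1 + s))
--     return out
-- ===== Notes on version B (the rewrite author's own statement) =====
-- stated objective: alternative
-- what changed: A's four nested loops (k over blocks, j over even then odd sub-blocks, inner loop over majorana components, appending) are replaced by a single flat pass over the output positions that decodes each position n arithmetically via div/mod into its (j, parity, component) coordinates and computes the pair directly.
import Mathlib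
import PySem

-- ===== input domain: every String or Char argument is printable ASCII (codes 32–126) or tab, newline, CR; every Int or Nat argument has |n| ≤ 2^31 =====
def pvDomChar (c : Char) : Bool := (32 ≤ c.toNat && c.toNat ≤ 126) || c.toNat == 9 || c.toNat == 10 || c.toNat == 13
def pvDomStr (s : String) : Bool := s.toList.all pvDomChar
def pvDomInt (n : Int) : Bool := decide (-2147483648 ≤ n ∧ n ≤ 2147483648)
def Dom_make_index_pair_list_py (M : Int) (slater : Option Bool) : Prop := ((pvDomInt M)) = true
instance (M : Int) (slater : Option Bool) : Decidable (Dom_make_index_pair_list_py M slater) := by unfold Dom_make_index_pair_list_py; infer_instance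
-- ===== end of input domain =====

-- B replaces A's four nested loops by a single flat pass that decodes each output
-- position arithmetically (div/mod) into its pair: an alternative algorithm, same value.

-- ===== PORT A =====
def make_index_pair_list_py (M : Int) (slater : Option Bool) : List (Int × Int) :=
  let majorana_components : List (Int × Int) :=
    if slater.getD false then [(0, 1), (1, 0)] else [(0, 1), (1, 0), (0, 0), (1, 1)]
  let index_pair_list := (PySem.List.pyRange 0 M 1).map (fun i => (i, M + i))
  (PySem.List.pyRange 0 (PySem.Int.floordiv M 2) 1).foldl (fun acc _k =>
    let acc :=
      (PySem.List.pyRange 0 (PySem.Int.floordiv M 2) 1).foldl (fun acc j =>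
        majorana_components.foldl (fun acc ab =>
          acc ++ [(M * ab.1 + 2 * j, M * ab.2 + 2 * j + 1)]) acc) acc
    (PySem.List.pyRange 0 (PySem.Int.floordiv M 2 - 1) 1).foldl (fun acc j =>
      majorana_components.foldl (fun acc ab =>
        acc ++ [(M * ab.1 + 2 * j + 1, M * ab.2 + 2 * j + 2)]) acc) acc) index_pair_list

-- ===== PORT B =====
-- helper: B's inner `decode(n)` (a closure over M, h, width, L, mc in Source B)
def pvDecode (M h width L : Int) (mc : List (Int × Int)) (n : Int) : Int × Int :=
  let m := PySem.Int.mod (n - M) (width * L)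
  let t := PySem.Int.floordiv m L     -- divmod(m, L)
  let c := PySem.Int.mod m L
  let js : Int × Int := if t < h then (t, 0) else (t - h, 1)
  let ab := PySem.List.pyGetD mc c (0, 0)   -- mc[c]; c = m % L is always in range
  (M * ab.1 + 2 * js.1 + js.2, M * ab.2 + 2 * js.1 + 1 + js.2)

def make_index_pair_list_py_alt (M : Int) (slater : Option Bool) : List (Int × Int) :=
  let mc : List (Int × Int) :=
    if slater.getD false then [(0, 1), (1, 0)] else [(0, 1), (1, 0), (0, 0), (1, 1)]
  let L : Int := mc.length
  let h := PySem.Int.floordiv M 2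
  let reps := max h 0
  let width := max (2 * h - 1) 0
  (PySem.List.pyRange 0 (M + reps * width * L) 1).map (fun n =>
    if n < M then (n, M + n) else pvDecode M h width L mc n)

-- ===== PRECONDITION & SPEC =====
def Spec_make_index_pair_list_py (M : Int) (slater : Option Bool) (out : List (Int × Int)) : Prop := out = make_index_pair_list_py_alt M slater
instance (M : Int) (slater : Option Bool) (out : List (Int × Int)) : Decidable (Spec_make_index_pair_list_py M slater out) := by unfold Spec_make_index_pair_list_py; infer_instance

-- ===== CLAIM (what is proved, stated in full; the proofs are below) =====
def Claim_equal_make_index_pair_list_py : Prop := ∀ (M : Int) (slater : Option Bool), Dom_make_index_pair_list_py M slater → Spec_make_index_pair_list_py M slater (make_index_pair_list_py M slater)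

-- ===== LEMMAS AND PROOFS =====

theorem pv_range_mul_decode {β : Type} (a b : Nat) (F : Nat → Nat → β) :
    (List.range (a * b)).map (fun n => F (n / b) (n % b)) =
      (List.range a).flatMap (fun i => (List.range b).map (F i)) := by
  induction a with
  | zero => simp
  | succ a ih =>
    rcases Nat.eq_zero_or_pos b with hb | hb
    · simp [hb]
    · rw [Nat.succ_mul, List.range_add, List.map_append, ih, List.range_succ,
        List.flatMap_append]
      congr 1
      simp only [List.flatMap_cons, List.flatMap_nil, List.append_nil, List.map_map]
      apply List.map_congr_left
      intro r hr
      have : r < b := List.mem_range.mp hr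
      simp [Nat.mul_comm a b, Nat.mul_add_div hb, Nat.div_eq_of_lt this, Nat.mod_eq_of_lt this]

theorem pv_map_range_getD {β : Type} (mc : List (Int × Int)) (H : Int × Int → β) :
    (List.range mc.length).map (fun c => H (mc.getD c (0, 0))) = mc.map H := by
  induction mc with
  | nil => simp
  | cons x xs ih =>
    rw [List.length_cons, List.range_succ_eq_map]
    simp only [List.map_cons, List.map_map, List.getD_cons_zero]
    simpa using ih

def pvG (M : Int) (hn Ln : Nat) (mc : List (Int × Int)) (m : Nat) : Int × Int :=
  let ab := mc.getD (m % Ln) (0, 0)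
  if m / Ln < hn then (M * ab.1 + 2 * ((m / Ln : Nat) : Int), M * ab.2 + 2 * ((m / Ln : Nat) : Int) + 1)
  else (M * ab.1 + 2 * (((m / Ln : Nat) : Int) - (hn : Int)) + 1,
        M * ab.2 + 2 * (((m / Ln : Nat) : Int) - (hn : Int)) + 2)

theorem pv_decode_eq (M : Int) (hn : Nat) (mc : List (Int × Int)) (k : Nat) :
    pvDecode M (hn : Int) ((2 * hn - 1 : Nat) : Int) ((mc.length : Nat) : Int) mc (M + (k : Int)) =
      pvG M hn mc.length mc (k % ((2 * hn - 1) * mc.length)) := by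
  unfold pvDecode pvG
  have h1 : M + (k:Int) - M = (k:Int) := by omega
  rw [h1]
  simp only [show ((2 * hn - 1 : Nat) : Int) * ((mc.length : Nat) : Int) = (((2*hn-1) * mc.length : Nat) : Int) by push_cast; ring,
    PySem.Int.mod_natCast, PySem.Int.floordiv_natCast, PySem.List.pyGetD_natCast, Nat.cast_lt]
  split_ifs with ht
  · simp
  · simp
    ring

theorem pv_inner (M : Int) (hn : Nat) (h1 : 1 ≤ hn) (mc : List (Int × Int)) :
    (List.range ((2*hn-1)*mc.length)).map (pvG M hn mc.length mc) =
    (List.range hn).flatMap (fun (j:Nat) => mc.map (fun ab => (M*ab.1 + 2*(j:Int), M*ab.2 + 2*(j:Int) + 1))) ++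
    (List.range (hn-1)).flatMap (fun (j:Nat) => mc.map (fun ab => (M*ab.1 + 2*(j:Int) + 1, M*ab.2 + 2*(j:Int) + 2))) := by
  have e2 := pv_range_mul_decode (2*hn-1) mc.length (fun t c =>
     let ab := mc.getD c ((0:Int),(0:Int));
     if t < hn then (M*ab.1 + 2*(t:Int), M*ab.2+2*(t:Int)+1)
     else (M*ab.1+2*((t:Int)-(hn:Int))+1, M*ab.2+2*((t:Int)-(hn:Int))+2))
  refine e2.trans ?_
  rw [show 2*hn-1 = hn + (hn-1) from by omega, List.range_add, List.flatMap_append, List.flatMap_map]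
  congr 1
  · apply List.flatMap_congr
    intro t ht
    have ht' : t < hn := List.mem_range.mp ht
    simp only [if_pos ht']
    exact pv_map_range_getD mc (fun ab => (M*ab.1 + 2*(t:Int), M*ab.2 + 2*(t:Int) + 1))
  · apply List.flatMap_congr
    intro j hj
    simp only [if_neg (by omega : ¬ hn + j < hn)]
    have : ((hn + j : Nat) : Int) - (hn : Int) = (j : Int) := by push_cast; ring
    simp only [this]
    exact pv_map_range_getD mc (fun ab => (M*ab.1 + 2*(j:Int) + 1, M*ab.2 + 2*(j:Int) + 2))

theorem pv_core (M : Int) (mc : List (Int × Int)) :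
    ((PySem.List.pyRange 0 (PySem.Int.floordiv M 2) 1).foldl (fun acc _k =>
      let acc :=
        (PySem.List.pyRange 0 (PySem.Int.floordiv M 2) 1).foldl (fun acc j =>
          mc.foldl (fun acc ab =>
            acc ++ [(M * ab.1 + 2 * j, M * ab.2 + 2 * j + 1)]) acc) acc
      (PySem.List.pyRange 0 (PySem.Int.floordiv M 2 - 1) 1).foldl (fun acc j =>
        mc.foldl (fun acc ab =>
          acc ++ [(M * ab.1 + 2 * j + 1, M * ab.2 + 2 * j + 2)]) acc) acc)
      ((PySem.List.pyRange 0 M 1).map (fun i => (i, M + i)))) =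
    (PySem.List.pyRange 0 (M + max (PySem.Int.floordiv M 2) 0 * max (2 * PySem.Int.floordiv M 2 - 1) 0 * (mc.length : Int)) 1).map
      (fun n => if n < M then (n, M + n)
        else pvDecode M (PySem.Int.floordiv M 2) (max (2 * PySem.Int.floordiv M 2 - 1) 0) (mc.length : Int) mc n) := by
  rcases Int.lt_or_le M 2 with hM | hM
  · have h0 : PySem.Int.floordiv M 2 ≤ 0 := by
      have := (PySem.Int.floordiv_lt_iff_lt_mul (a := M) (b := 2) (q := 1) (by norm_num)).mpr (by omega)
      omega
    have hm0 : max (PySem.Int.floordiv M 2) 0 = 0 := by omega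
    rw [PySem.List.pyRange_one_eq_nil h0, hm0]
    simp only [List.foldl_nil, zero_mul, add_zero]
    apply (List.map_congr_left ?_).symm
    intro n hn
    rw [if_pos (PySem.List.mem_pyRange_one.mp hn).2]
  · have h1 : (1:Int) ≤ PySem.Int.floordiv M 2 := by
      rw [PySem.Int.le_floordiv_iff_mul_le (by norm_num)]; omega
    obtain ⟨hn, hhn⟩ : ∃ n : Nat, PySem.Int.floordiv M 2 = (n:Int) :=
      ⟨(PySem.Int.floordiv M 2).toNat, by omega⟩
    have hn1 : 1 ≤ hn := by omega
    have hmax1 : max ((hn:Nat):Int) 0 = ((hn:Nat):Int) := by omega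
    have hmax2 : max (2 * ((hn:Nat):Int) - 1) 0 = ((2*hn-1 : Nat):Int) := by omega
    simp only [PySem.List.foldl_append_singleton_eq_map, PySem.List.foldl_append_eq_flatMap,
      List.append_assoc, hhn, hmax1, hmax2]
    have hc : ((hn:Int) - 1) = ((hn - 1 : Nat) : Int) := by omega
    simp only [hc, PySem.List.pyRange_zero_natCast, List.flatMap_map]
    have hT : (hn:Int) * ((2*hn-1 : Nat):Int) * ((mc.length:Nat):Int) = ((hn*((2*hn-1)*mc.length) : Nat):Int) := by push_cast; ring
    rw [hT]
    rw [PySem.List.pyRange_one_append 0 M (M + ((hn*((2*hn-1)*mc.length) : Nat):Int)) (by omega) (by omega), List.map_append]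
    congr 1
    · symm
      apply List.map_congr_left
      intro n hnn
      rw [if_pos (PySem.List.mem_pyRange_one.mp hnn).2]
    · have hr : PySem.List.pyRange M (M + ((hn*((2*hn-1)*mc.length) : Nat):Int)) 1 =
          (List.range (hn*((2*hn-1)*mc.length))).map (fun (k:Nat) => M + (k:Int)) := by
        rw [PySem.List.pyRange_one,
          show M + ((hn*((2*hn-1)*mc.length) : Nat):Int) - M = ((hn*((2*hn-1)*mc.length) : Nat):Int) from by ring,
          Int.toNat_natCast]
      rw [hr, List.map_map]
      have hstep : ∀ k ∈ List.range (hn*((2*hn-1)*mc.length)),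
          ((fun n => if n < M then (n, M + n) else pvDecode M ((hn:Nat):Int) ((2*hn-1 : Nat):Int) ((mc.length:Nat):Int) mc n) ∘ (fun (k:Nat) => M + (k:Int))) k
            = pvG M hn mc.length mc (k % ((2*hn-1)*mc.length)) := by
        intro k hk
        simp only [Function.comp]
        rw [if_neg (by omega), pv_decode_eq]
      rw [List.map_congr_left hstep]
      symm
      refine (pv_range_mul_decode hn ((2*hn-1)*mc.length) (fun _ m => pvG M hn mc.length mc m)).trans ?_
      apply List.flatMap_congr
      intro x hx
      exact pv_inner M hn hn1 mc


-- ===== VERDICT (by name: the statement is the Claim_ definition above) =====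
theorem make_index_pair_list_py_spec : Claim_equal_make_index_pair_list_py := by
  intro M slater _
  unfold Spec_make_index_pair_list_py make_index_pair_list_py make_index_pair_list_py_alt
  cases hb : slater.getD false <;> simp only [if_true] <;> exact pv_core M _
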